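-- pv_equiv track=rewrite | github.com/rbnuria/Entity-Aspect-Recognition | src/sequential.py | dataPreparation
-- ===== SOURCE A (Python) =====
-- MAX_LENGTH = 65
--
-- def padding_truncate(training_sentences):
--     """Amplia o recorta las oraciones de entrenamiento.
--
--     Args:
--         training_sentences: Lista de listas de enteros.
--
--     -> En este caso solo ampliaría pues estamos tomando como tamaño la frase más larga
--     """
--
--     for i in range(len(training_sentences)):
--         sent_size = len(training_sentences[i])
--         if sent_size > MAX_LENGTH:
--             training_sentences[i] = training_sentences[i][:MAX_LENGTH]
--         elif sent_size < MAX_LENGTH: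
--             training_sentences[i] += [0] * (MAX_LENGTH - sent_size)
--
--     return training_sentences
--
-- def labelsToIdx(label):
--
-- 	aux = 0
--
-- 	if(label == 'O'):
-- 		aux = 1
-- 	elif(label == 'B'):
-- 		aux = 2
-- 	elif(label == 'I'):
-- 		aux = 3
--
-- 	return aux
--
-- def dataPreparation(sentences, labels, word_to_index):
-- 	'''
-- 		Método que prepara los datos -> padding a las frases al tamaño de la frase más larga
--
-- 	'''
--
-- 	x_matrix = []
-- 	y_matrix = []
--
-- 	padding_index = word_to_index["PADDING"]
-- 	unkown_index = word_to_index["UNKOWN"]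
--
--
--
-- 	for sentence in sentences:
--
-- 		wordIndices = []
--
-- 		for word in sentence:
-- 			if word in word_to_index:
-- 				wordIndices.append(word_to_index[word])
-- 			elif word.lower() in word_to_index:
-- 				wordIndices.append(word_to_index[word.lower()])
-- 			else:
-- 				wordIndices.append(unkown_index)
--
-- 		x_matrix.append(wordIndices)
--
-- 	#Padding a todas las frases
-- 	x_matrix = padding_truncate(x_matrix)
--
--
-- 	for fila_labels in labels:
-- 		labelIndices = []
--
-- 		for label in fila_labels:
-- 			labelIndices.append(labelsToIdx(label))
--
-- 		y_matrix.append(labelIndices)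
--
-- 	#Padding a las etiquetas
-- 	y_matrix = padding_truncate(y_matrix)
--
--
--
-- 	return (x_matrix, y_matrix)
-- ===== SOURCE B (Python) =====
-- # B: fuses row building and padding: each output row is preallocated as [0]*MAX_LENGTH
-- # and filled in place for the first MAX_LENGTH tokens, removing the padding_truncate pass.
-- MAX_LENGTH = 65
-- LABEL_TO_IDX = {'O': 1, 'B': 2, 'I': 3}
--
-- def dataPreparation(sentences, labels, word_to_index):
--     unknown_index = word_to_index["UNKOWN"]
--     x_matrix = []
--     for sentence in sentences:
--         row = [0] * MAX_LENGTH
--         for i, word in enumerate(sentence[:MAX_LENGTH]):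
--             idx = word_to_index.get(word)
--             if idx is None:
--                 idx = word_to_index.get(word.lower(), unknown_index)
--             row[i] = idx
--         x_matrix.append(row)
--     y_matrix = []
--     for fila_labels in labels:
--         row = [0] * MAX_LENGTH
--         for i, label in enumerate(fila_labels[:MAX_LENGTH]):
--             row[i] = LABEL_TO_IDX.get(label, 0)
--         y_matrix.append(row)
--     return (x_matrix, y_matrix)
-- ===== Notes on version B (the rewrite author's own statement) =====
-- stated objective: alternative
-- what changed: B preallocates each output row as a fixed [0]*MAX_LENGTH buffer and writes looked-up indices into its first min(len,MAX_LENGTH) slots, fusing A's build-variable-rows phase and its separate padding_truncate slice/append pass into one fill loop (labels via a lookup table instead of the if-chain).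
import Mathlib
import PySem

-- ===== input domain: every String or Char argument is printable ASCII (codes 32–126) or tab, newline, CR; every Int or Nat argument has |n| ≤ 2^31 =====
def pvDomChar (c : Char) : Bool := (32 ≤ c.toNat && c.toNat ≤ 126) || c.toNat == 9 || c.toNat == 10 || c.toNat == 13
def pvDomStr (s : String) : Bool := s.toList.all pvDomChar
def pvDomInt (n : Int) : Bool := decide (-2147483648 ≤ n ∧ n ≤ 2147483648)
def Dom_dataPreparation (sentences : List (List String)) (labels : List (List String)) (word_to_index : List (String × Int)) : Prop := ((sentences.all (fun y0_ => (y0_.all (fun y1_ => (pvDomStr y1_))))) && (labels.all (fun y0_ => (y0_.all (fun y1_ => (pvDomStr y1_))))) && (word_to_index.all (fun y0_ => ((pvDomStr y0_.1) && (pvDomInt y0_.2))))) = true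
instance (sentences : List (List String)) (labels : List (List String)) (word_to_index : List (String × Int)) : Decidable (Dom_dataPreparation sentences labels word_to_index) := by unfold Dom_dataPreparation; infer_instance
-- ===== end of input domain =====

-- B fuses A's two phases (build variable-length rows, then a separate padding_truncate
-- pass) into a single fill of a preallocated zero row per sentence; equal on Pre_ (both
-- "PADDING" and "UNKOWN" present; A raises KeyError otherwise).

-- ===== PORT A =====
def pyMAX_LENGTH : Nat := 65

def labelsToIdx (label : String) : Int :=
  -- aux = 0; if/elif chain
  if label = "O" then 1
  else if label = "B" then 2
  else if label = "I" then 3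
  else 0

-- padding_truncate: per-row, truncate with a slice or extend with [0]*(MAX-len)
def paddingTruncate (rows : List (List Int)) : List (List Int) :=
  rows.map (fun r =>
    if r.length > pyMAX_LENGTH then PySem.List.slice r none (some (pyMAX_LENGTH : Int))
    else if r.length < pyMAX_LENGTH then r ++ List.replicate (pyMAX_LENGTH - r.length) (0 : Int)
    else r)

def dataPreparation (sentences : List (List String)) (labels : List (List String)) (word_to_index : List (String × Int)) : List (List Int) × List (List Int) :=
  let d := PySem.Dict.mk word_to_index
  -- word_to_index["PADDING"] raises KeyError when absent: Pre_ excludes that; the value is unused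
  let _padding_index := (d.get? "PADDING").getD 0
  let unkown_index := (d.get? "UNKOWN").getD 0   -- KeyError when absent: excluded by Pre_
  let x_matrix := sentences.map (fun sentence =>
    sentence.map (fun word =>
      if d.contains word then (d.get? word).getD 0
      else if d.contains (PySem.Str.lower word) then (d.get? (PySem.Str.lower word)).getD 0
      else unkown_index))
  let x_matrix := paddingTruncate x_matrix
  let y_matrix := labels.map (fun fila_labels => fila_labels.map labelsToIdx)
  let y_matrix := paddingTruncate y_matrix
  (x_matrix, y_matrix)

-- ===== PORT B =====
-- LABEL_TO_IDX = {'O': 1, 'B': 2, 'I': 3}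
def labelToIdxDict : PySem.Dict String Int := PySem.Dict.mk [("O", 1), ("B", 2), ("I", 3)]

-- word_to_index.get(word); if None: word_to_index.get(word.lower(), unknown_index)
def lookupWordB (d : PySem.Dict String Int) (unknown_index : Int) (word : String) : Int :=
  match d.get? word with
  | some v => v
  | none => (d.get? (PySem.Str.lower word)).getD unknown_index

-- row = [0]*MAX_LENGTH; for i, w in enumerate(ws[:MAX_LENGTH]): row[i] = f w
def fillRowB (f : String → Int) (ws : List String) : List Int :=
  (PySem.List.enumerate (PySem.List.slice ws none (some (pyMAX_LENGTH : Int)))).foldl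
    (fun row p => PySem.List.pySetD row p.1 (f p.2)) (List.replicate pyMAX_LENGTH (0 : Int))

def dataPreparation_alt (sentences : List (List String)) (labels : List (List String)) (word_to_index : List (String × Int)) : List (List Int) × List (List Int) :=
  let d := PySem.Dict.mk word_to_index
  let unknown_index := (d.get? "UNKOWN").getD 0   -- KeyError when absent: excluded by Pre_
  (sentences.map (fun sentence => fillRowB (lookupWordB d unknown_index) sentence),
   labels.map (fun fila_labels => fillRowB (fun lab => labelToIdxDict.getD lab 0) fila_labels))

-- ===== PRECONDITION & SPEC =====
-- Pre_ excludes exactly the inputs where Python A raises KeyError: word_to_index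
-- missing the "PADDING" or "UNKOWN" key.
def Pre_dataPreparation (sentences : List (List String)) (labels : List (List String)) (word_to_index : List (String × Int)) : Prop :=
  (PySem.Dict.mk word_to_index).contains "PADDING" = true ∧
  (PySem.Dict.mk word_to_index).contains "UNKOWN" = true
instance (sentences : List (List String)) (labels : List (List String)) (word_to_index : List (String × Int)) : Decidable (Pre_dataPreparation sentences labels word_to_index) := by unfold Pre_dataPreparation; infer_instance

def pvWitness_dataPreparation : List (List String) × List (List String) × (List (String × Int)) :=
  ([["hi", "there"]], [["O", "B"]], [("PADDING", 0), ("UNKOWN", 1), ("hi", 2)])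

def Spec_dataPreparation (sentences : List (List String)) (labels : List (List String)) (word_to_index : List (String × Int)) (out : List (List Int) × List (List Int)) : Prop := out = dataPreparation_alt sentences labels word_to_index
instance (sentences : List (List String)) (labels : List (List String)) (word_to_index : List (String × Int)) (out : List (List Int) × List (List Int)) : Decidable (Spec_dataPreparation sentences labels word_to_index out) := by unfold Spec_dataPreparation; infer_instance

-- ===== CLAIM =====
def Claim_equal_dataPreparation : Prop := ∀ (sentences : List (List String)) (labels : List (List String)) (word_to_index : List (String × Int)), Dom_dataPreparation sentences labels word_to_index → Pre_dataPreparation sentences labels word_to_index → Spec_dataPreparation sentences labels word_to_index (dataPreparation sentences labels word_to_index)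
-- ===== LEMMAS AND PROOFS =====

-- filling slots i, i+1, … of pre ++ [0]*m writes the mapped values in place
lemma fill_loop (f : String → Int) : ∀ (ws : List String) (pre : List Int) (m : Nat), ws.length ≤ m →
    (PySem.List.enumerate ws (pre.length : Int)).foldl
      (fun row p => PySem.List.pySetD row p.1 (f p.2)) (pre ++ List.replicate m (0 : Int))
    = pre ++ ws.map f ++ List.replicate (m - ws.length) (0 : Int) := by
  intro ws
  induction ws with
  | nil => intro pre m _; simp [PySem.List.enumerate_nil]
  | cons a ws ih =>
    intro pre m hm
    have hpos : 1 ≤ m := le_trans (by simp) hm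
    obtain ⟨m', rfl⟩ : ∃ m', m = m' + 1 := ⟨m - 1, by omega⟩
    have hm' : ws.length ≤ m' := by simp at hm; omega
    rw [PySem.List.enumerate_cons]
    simp only [List.foldl_cons]
    have hset : PySem.List.pySetD (pre ++ List.replicate (m' + 1) (0 : Int)) (pre.length : Int) (f a)
        = (pre ++ [f a]) ++ List.replicate m' (0 : Int) := by
      rw [PySem.List.pySetD_natCast]
      simp [List.replicate_succ]
    rw [hset]
    have hlen : (pre.length : Int) + 1 = (((pre ++ [f a]).length : Nat) : Int) := by
      simp
    rw [hlen, ih (pre ++ [f a]) m' hm']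
    simp [List.append_assoc, Nat.succ_sub_succ]

-- B's fused fill equals "map then pad/truncate to 65" on one row
lemma fillRowB_eq (f : String → Int) (ws : List String) :
    fillRowB f ws = (ws.map f).take pyMAX_LENGTH
      ++ List.replicate (pyMAX_LENGTH - ws.length) (0 : Int) := by
  unfold fillRowB
  rw [PySem.List.slice_to ws (by norm_num : (0:Int) ≤ (pyMAX_LENGTH : Int))]
  have h := fill_loop f (ws.take (pyMAX_LENGTH : Int).toNat) ([] : List Int) pyMAX_LENGTH
    (by simp)
  simp only [List.length_nil, Nat.cast_zero, List.nil_append] at h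
  rw [h]
  simp [List.map_take, pyMAX_LENGTH]
  omega

-- A's per-row padding_truncate result, in the same normal form
lemma pad_row_eq (r : List Int) :
    (if r.length > pyMAX_LENGTH then PySem.List.slice r none (some (pyMAX_LENGTH : Int))
     else if r.length < pyMAX_LENGTH then r ++ List.replicate (pyMAX_LENGTH - r.length) (0 : Int)
     else r)
    = r.take pyMAX_LENGTH ++ List.replicate (pyMAX_LENGTH - r.length) (0 : Int) := by
  rw [PySem.List.slice_to r (by norm_num : (0:Int) ≤ (pyMAX_LENGTH : Int))]
  split_ifs with h1 h2
  · have : pyMAX_LENGTH - r.length = 0 := by omega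
    simp [this]
  · rw [List.take_of_length_le (by omega)]
  · have hlen : r.length = pyMAX_LENGTH := by omega
    simp [hlen]

-- A's word lookup chain = B's get?-match chain, pointwise
lemma lookup_eq (d : PySem.Dict String Int) (unk : Int) (word : String) :
    (if d.contains word then (d.get? word).getD 0
     else if d.contains (PySem.Str.lower word) then (d.get? (PySem.Str.lower word)).getD 0
     else unk)
    = lookupWordB d unk word := by
  unfold lookupWordB
  rw [PySem.Dict.contains_eq_isSome_get?, PySem.Dict.contains_eq_isSome_get?]
  cases h : d.get? word with
  | some v => simp
  | none =>
    cases h2 : d.get? (PySem.Str.lower word) with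
    | some v => simp
    | none => simp

-- A's labelsToIdx if-chain = B's table lookup, pointwise
lemma label_eq (lab : String) : labelsToIdx lab = labelToIdxDict.getD lab 0 := by
  by_cases h1 : lab = "O"
  · subst h1; decide
  · by_cases h2 : lab = "B"
    · subst h2; decide
    · by_cases h3 : lab = "I"
      · subst h3; decide
      · have e1 : ("O" == lab) = false := by rw [beq_eq_false_iff_ne]; exact Ne.symm h1
        have e2 : ("B" == lab) = false := by rw [beq_eq_false_iff_ne]; exact Ne.symm h2
        have e3 : ("I" == lab) = false := by rw [beq_eq_false_iff_ne]; exact Ne.symm h3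
        unfold labelsToIdx labelToIdxDict
        rw [PySem.Dict.getD_eq_get?_getD]
        simp [PySem.Dict.get?, List.find?, e1, e2, e3, h1, h2, h3]

-- ===== VERDICT =====
theorem dataPreparation_spec : Claim_equal_dataPreparation := by
  intro sentences labels word_to_index _ _
  unfold Spec_dataPreparation dataPreparation dataPreparation_alt paddingTruncate
  simp only [List.map_map]
  rw [Prod.mk.injEq]
  constructor
  · apply List.map_congr_left
    intro sentence _
    simp only [Function.comp_apply]
    rw [pad_row_eq, fillRowB_eq]
    have hmap : sentence.map (fun word =>
        if (PySem.Dict.mk word_to_index).contains word then ((PySem.Dict.mk word_to_index).get? word).getD 0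
        else if (PySem.Dict.mk word_to_index).contains (PySem.Str.lower word) then ((PySem.Dict.mk word_to_index).get? (PySem.Str.lower word)).getD 0
        else ((PySem.Dict.mk word_to_index).get? "UNKOWN").getD 0)
        = sentence.map (lookupWordB (PySem.Dict.mk word_to_index) (((PySem.Dict.mk word_to_index).get? "UNKOWN").getD 0)) :=
      List.map_congr_left (fun w _ => lookup_eq _ _ w)
    rw [hmap]
    simp
  · apply List.map_congr_left
    intro fila _
    simp only [Function.comp_apply]
    rw [pad_row_eq, fillRowB_eq]
    rw [List.map_congr_left (fun lab _ => label_eq lab)]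
    simp
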